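-- pv_equiv track=rewrite | github.com/pvestal/repo-clean | src/core/scanner.py | _suggest_better_name
-- ===== SOURCE A (Python) =====
-- def _suggest_better_name(filename: str) -> str:
--     """Suggest better naming for problematic files"""
--     # Remove problematic prefixes and suggest alternatives
--     for prefix in ['ENHANCED_', 'WORKING_', 'FIXED_', 'FINAL_', 'NEW_', 'OLD_', 'TEMP_', 'TEST_']:
--         if filename.startswith(prefix):
--             base_name = filename[len(prefix):]
--             if prefix in ['ENHANCED_', 'WORKING_']:
--                 return f"{base_name} (or add descriptive suffix like _v2, _draft)"
--             elif prefix in ['FIXED_', 'FINAL_']: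
--                 return f"{base_name} (remove temporary prefix)"
--             elif prefix in ['NEW_', 'OLD_']:
--                 return f"{base_name} (use version control instead)"
--             elif prefix in ['TEMP_', 'TEST_']:
--                 return f"{base_name} (move to temp/ or tests/ directory)"
--
--     return "Use descriptive, professional naming"
-- ===== SOURCE B (Python) =====
-- _SUGGESTIONS = {
--     'ENHANCED': ' (or add descriptive suffix like _v2, _draft)',
--     'WORKING': ' (or add descriptive suffix like _v2, _draft)',
--     'FIXED': ' (remove temporary prefix)',
--     'FINAL': ' (remove temporary prefix)',
--     'NEW': ' (use version control instead)',
--     'OLD': ' (use version control instead)',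
--     'TEMP': ' (move to temp/ or tests/ directory)',
--     'TEST': ' (move to temp/ or tests/ directory)',
-- }
--
--
-- def _suggest_better_name(filename: str) -> str:
--     """Suggest better naming for problematic files."""
--     # Split once at the first underscore and hash-look-up the leading token:
--     # every problematic prefix is exactly <TOKEN>_ with an underscore-free token,
--     # so the first-underscore token determines the (at most one) matching prefix.
--     head, sep, rest = filename.partition('_')
--     if sep:
--         suffix = _SUGGESTIONS.get(head)
--         if suffix is not None:
--             return rest + suffix
--     return "Use descriptive, professional naming"
-- ===== Notes on version B (the rewrite author's own statement) =====
-- stated objective: alternative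
-- what changed: Instead of scanning the eight known prefixes and testing startswith for each, B partitions the filename once at its first underscore and hash-looks-up the leading token in a token->suffix dict; correctness rests on every prefix being an underscore-free token followed by '_', so the first-underscore token determines the unique possible match.
import Mathlib
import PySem

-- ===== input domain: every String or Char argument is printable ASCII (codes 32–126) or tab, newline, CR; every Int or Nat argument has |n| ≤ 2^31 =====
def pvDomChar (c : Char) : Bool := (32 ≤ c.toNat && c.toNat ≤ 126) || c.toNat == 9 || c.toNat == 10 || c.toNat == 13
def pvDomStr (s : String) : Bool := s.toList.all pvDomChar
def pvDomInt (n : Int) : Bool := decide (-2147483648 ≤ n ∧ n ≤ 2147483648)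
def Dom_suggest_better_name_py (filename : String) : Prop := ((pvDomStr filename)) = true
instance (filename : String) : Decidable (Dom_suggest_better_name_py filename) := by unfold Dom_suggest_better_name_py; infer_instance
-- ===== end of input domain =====

-- B replaces A's scan over eight prefixes by one partition of the filename at its first
-- underscore followed by a single token→suffix dict lookup (alternative decomposition).

-- ===== PORT A =====
def pvA_loop (filename : String) : List String → String
  | [] => "Use descriptive, professional naming"
  | p :: rest =>
    if PySem.Str.startswith filename p then
      let base_name := PySem.Str.slice filename (some (PySem.Str.len p)) none
      if p ∈ ["ENHANCED_", "WORKING_"] then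
        base_name ++ " (or add descriptive suffix like _v2, _draft)"
      else if p ∈ ["FIXED_", "FINAL_"] then
        base_name ++ " (remove temporary prefix)"
      else if p ∈ ["NEW_", "OLD_"] then
        base_name ++ " (use version control instead)"
      else if p ∈ ["TEMP_", "TEST_"] then
        base_name ++ " (move to temp/ or tests/ directory)"
      else pvA_loop filename rest
    else pvA_loop filename rest

def suggest_better_name_py (filename : String) : String :=
  pvA_loop filename ["ENHANCED_", "WORKING_", "FIXED_", "FINAL_", "NEW_", "OLD_", "TEMP_", "TEST_"]

-- ===== PORT B =====
def pvSuggestions : PySem.Dict String String :=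
  PySem.Dict.ofList
    [ ("ENHANCED", " (or add descriptive suffix like _v2, _draft)")
    , ("WORKING", " (or add descriptive suffix like _v2, _draft)")
    , ("FIXED", " (remove temporary prefix)")
    , ("FINAL", " (remove temporary prefix)")
    , ("NEW", " (use version control instead)")
    , ("OLD", " (use version control instead)")
    , ("TEMP", " (move to temp/ or tests/ directory)")
    , ("TEST", " (move to temp/ or tests/ directory)") ]

-- filename.partition('_') ported by hand (PySem has no partition; exact on all inputs):
-- i = index of the first '_' (Python's find, -1 = absent), head = filename[:i], rest = filename[i+1:].
def suggest_better_name_py_alt (filename : String) : String :=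
  let i := PySem.Str.find filename "_"
  if i = -1 then "Use descriptive, professional naming"
  else
    match pvSuggestions.get? (PySem.Str.slice filename none (some i)) with
    | some suffix => PySem.Str.slice filename (some (i + 1)) none ++ suffix
    | none => "Use descriptive, professional naming"

-- ===== PRECONDITION & SPEC =====
def Spec_suggest_better_name_py (filename : String) (out : String) : Prop := out = suggest_better_name_py_alt filename
instance (filename : String) (out : String) : Decidable (Spec_suggest_better_name_py filename out) := by unfold Spec_suggest_better_name_py; infer_instance

-- ===== CLAIM (what is proved, stated in full; the proofs are below) =====
def Claim_equal_suggest_better_name_py : Prop := ∀ (filename : String), Dom_suggest_better_name_py filename → Spec_suggest_better_name_py filename (suggest_better_name_py filename)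

-- ===== LEMMAS AND PROOFS =====

theorem pv_prefix_singleton (c : Char) (xs : List Char) :
    [c] <+: xs ↔ xs.head? = some c := by
  constructor
  · rintro ⟨t, rfl⟩; rfl
  · intro h
    cases xs with
    | nil => simp at h
    | cons a t => simp at h; exact ⟨t, by simp [h]⟩

theorem pv_find_token (T r : List Char) (hT : '_' ∉ T) :
    PySem.Chars.find (T ++ '_' :: r) ['_'] = (T.length : Int) := by
  have hpre : ['_'] <+: (T ++ '_' :: r).drop T.length := by
    rw [List.drop_left]; exact ⟨r, rfl⟩
  have h0 : 0 ≤ PySem.Chars.find (T ++ '_' :: r) ['_'] :=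
    (PySem.Chars.find_nonneg_iff _ _).mpr ⟨T, r, by simp⟩
  obtain ⟨hp, hmin⟩ := PySem.Chars.find_spec h0
  set j := (PySem.Chars.find (T ++ '_' :: r) ['_']).toNat with hj
  have hle : j ≤ T.length := by
    by_contra h'
    exact hmin T.length (by omega) hpre
  have hge : T.length ≤ j := by
    by_contra h'
    have hjT : j < T.length := by omega
    have := (pv_prefix_singleton _ _).mp hp
    rw [List.head?_drop] at this
    have : (T ++ '_' :: r)[j]? = some '_' := this
    rw [List.getElem?_append_left hjT] at this
    have hmem : '_' ∈ T := by
      rw [List.getElem?_eq_getElem hjT] at this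
      have h'' : T[j] = '_' := by injection this
      exact h'' ▸ List.getElem_mem hjT
    exact hT hmem
  have : j = T.length := le_antisymm hle hge
  omega

theorem pv_find_decomp (l : List Char) (i : Nat) (h : PySem.Chars.find l ['_'] = (i : Int)) :
    l = l.take i ++ '_' :: l.drop (i + 1) ∧ '_' ∉ l.take i := by
  have h0 : 0 ≤ PySem.Chars.find l ['_'] := by omega
  obtain ⟨hp, hmin⟩ := PySem.Chars.find_spec h0
  rw [h] at hp hmin
  simp only [Int.toNat_natCast] at hp hmin
  have hhd : l[i]? = some '_' := by
    rw [← List.head?_drop]; exact (pv_prefix_singleton _ _).mp hp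
  constructor
  · have hdrop : l.drop i = '_' :: l.drop (i + 1) := by
      have hh := (pv_prefix_singleton _ _).mp hp
      have htl : l.drop (i + 1) = (l.drop i).tail := by
        rw [← List.drop_drop]; simp
      cases hd : l.drop i with
      | nil => rw [hd] at hh; simp at hh
      | cons a t =>
        rw [hd] at hh; simp at hh
        rw [htl, hd, hh]; rfl
    conv_lhs => rw [← List.take_append_drop i l]
    rw [hdrop]
  · intro hmem
    obtain ⟨k, hk, hek⟩ := List.getElem_of_mem hmem
    have hki : k < i := by
      have := hk; simp [List.length_take] at this; omega
    have : l[k]? = some '_' := by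
      have hkl : k < l.length := by
        have := hk; simp [List.length_take] at this
        omega
      rw [List.getElem_take] at hek
      rw [List.getElem?_eq_getElem hkl]
      exact congrArg some hek
    exact hmin k hki ((pv_prefix_singleton _ _).mpr (by rw [List.head?_drop]; exact this))

theorem pv_sw_iff (f : String) (i : Nat)
    (hfind : PySem.Chars.find f.toList ['_'] = (i : Int)) (K : List Char) (hK : '_' ∉ K) :
    (K ++ ['_']) <+: f.toList ↔ f.toList.take i = K := by
  obtain ⟨hdec, hfree⟩ := pv_find_decomp f.toList i hfind
  constructor
  · rintro ⟨r2, hr⟩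
    have hl : f.toList = K ++ '_' :: r2 := by rw [← hr]; simp
    have hfk := pv_find_token K r2 hK
    rw [← hl] at hfk
    have hik : K.length = i := by rw [hfind] at hfk; exact_mod_cast hfk.symm
    rw [← hik, hl, List.take_left]
  · intro ht
    refine ⟨f.toList.drop (i + 1), ?_⟩
    conv_rhs => rw [hdec]
    rw [ht]; simp

theorem pv_get_none (s : String) (h1 : s ≠ "ENHANCED") (h2 : s ≠ "WORKING") (h3 : s ≠ "FIXED")
    (h4 : s ≠ "FINAL") (h5 : s ≠ "NEW") (h6 : s ≠ "OLD") (h7 : s ≠ "TEMP") (h8 : s ≠ "TEST") :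
    pvSuggestions.get? s = none := by
  have e1 := beq_eq_false_iff_ne.mpr (Ne.symm h1)
  have e2 := beq_eq_false_iff_ne.mpr (Ne.symm h2)
  have e3 := beq_eq_false_iff_ne.mpr (Ne.symm h3)
  have e4 := beq_eq_false_iff_ne.mpr (Ne.symm h4)
  have e5 := beq_eq_false_iff_ne.mpr (Ne.symm h5)
  have e6 := beq_eq_false_iff_ne.mpr (Ne.symm h6)
  have e7 := beq_eq_false_iff_ne.mpr (Ne.symm h7)
  have e8 := beq_eq_false_iff_ne.mpr (Ne.symm h8)
  have hitems : pvSuggestions.items =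
      [ ("ENHANCED", " (or add descriptive suffix like _v2, _draft)")
      , ("WORKING", " (or add descriptive suffix like _v2, _draft)")
      , ("FIXED", " (remove temporary prefix)")
      , ("FINAL", " (remove temporary prefix)")
      , ("NEW", " (use version control instead)")
      , ("OLD", " (use version control instead)")
      , ("TEMP", " (move to temp/ or tests/ directory)")
      , ("TEST", " (move to temp/ or tests/ directory)") ] := by decide
  simp only [PySem.Dict.get?, hitems, List.find?, e1, e2, e3, e4, e5, e6, e7, e8]
  rfl

theorem pv_main (f : String) : suggest_better_name_py f = suggest_better_name_py_alt f := by
  by_cases hU : '_' ∈ f.toList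
  case neg =>
    have hfS : PySem.Str.find f "_" = -1 := by
      rw [PySem.Str.find_eq]
      refine (PySem.Chars.find_eq_neg_one_iff _ _).mpr ?_
      rintro ⟨s, t, hst⟩
      exact hU (by rw [← hst]; simp)
    have hsw : ∀ p : String, '_' ∈ p.toList → PySem.Str.startswith f p = false := by
      intro p hp
      rw [PySem.Str.startswith_eq, Bool.eq_false_iff]
      intro hT
      exact hU (((PySem.Chars.startswith_iff _ _).mp hT).subset hp)
    simp only [suggest_better_name_py, pvA_loop,
      hsw "ENHANCED_" (by decide),
      hsw "WORKING_" (by decide),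
      hsw "FIXED_" (by decide),
      hsw "FINAL_" (by decide),
      hsw "NEW_" (by decide),
      hsw "OLD_" (by decide),
      hsw "TEMP_" (by decide),
      hsw "TEST_" (by decide)]
    simp only [suggest_better_name_py_alt, hfS]
    simp
  case pos =>
    have h0 : 0 ≤ PySem.Chars.find f.toList ['_'] := by
      rw [PySem.Chars.find_nonneg_iff]
      obtain ⟨s, t, hst⟩ := List.append_of_mem hU
      exact ⟨s, t, by rw [hst]; simp⟩
    set i := (PySem.Chars.find f.toList ['_']).toNat with hidef
    have hfind : PySem.Chars.find f.toList ['_'] = (i : Int) := (Int.toNat_of_nonneg h0).symm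
    have hfS : PySem.Str.find f "_" = (i : Int) := by rw [PySem.Str.find_eq]; exact hfind
    have hile : i ≤ f.toList.length := by
      have hl := PySem.Chars.find_le_length f.toList ['_']
      rw [hfind] at hl
      exact_mod_cast hl
    have hheadL : (PySem.Str.slice f none (some ((i : Nat) : Int))).toList = f.toList.take i := by
      rw [PySem.Str.toList_slice, PySem.Chars.slice_eq_listSlice, PySem.List.slice_to_natCast]
    have hB : suggest_better_name_py_alt f =
        match pvSuggestions.get? (PySem.Str.slice f none (some ((i : Nat) : Int))) with
        | some suffix => PySem.Str.slice f (some ((i : Int) + 1)) none ++ suffix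
        | none => "Use descriptive, professional naming" := by
      simp only [suggest_better_name_py_alt, hfS]
      rw [if_neg (by omega)]
    have hswT : ∀ (p : String) (K : List Char), p.toList = K ++ ['_'] → '_' ∉ K →
        f.toList.take i = K → PySem.Str.startswith f p = true := by
      intro p K hpK hK heq
      rw [PySem.Str.startswith_eq, PySem.Chars.startswith_iff, hpK]
      exact (pv_sw_iff f i hfind K hK).mpr heq
    have hswF : ∀ (p : String) (K : List Char), p.toList = K ++ ['_'] → '_' ∉ K →
        f.toList.take i ≠ K → PySem.Str.startswith f p = false := by
      intro p K hpK hK hne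
      rw [PySem.Str.startswith_eq, Bool.eq_false_iff]
      intro hT
      refine hne ((pv_sw_iff f i hfind K hK).mp ?_)
      rw [← hpK]
      exact (PySem.Chars.startswith_iff _ _).mp hT
    have hneS : ∀ K : String, f.toList.take i ≠ K.toList →
        PySem.Str.slice f none (some ((i : Nat) : Int)) ≠ K := by
      intro K hne he
      exact hne (by rw [← hheadL, he])
    have hheadEq : ∀ K : String, f.toList.take i = K.toList →
        PySem.Str.slice f none (some ((i : Nat) : Int)) = K := by
      intro K heq
      exact String.toList_inj.mp (hheadL.trans heq)
    have hlenEq : ∀ (K : List Char), f.toList.take i = K → i = K.length := by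
      intro K heq
      have hc := congrArg List.length heq
      rw [List.length_take] at hc
      omega
    by_cases h1 : f.toList.take i = "ENHANCED".toList
    · have hi := hlenEq _ h1
      rw [hB, hheadEq _ h1]
      simp only [show pvSuggestions.get? "ENHANCED" = some " (or add descriptive suffix like _v2, _draft)" from rfl]
      simp only [suggest_better_name_py, pvA_loop,
        hswT "ENHANCED_" "ENHANCED".toList (by decide) (by decide) h1]
      simp [hi]
    by_cases h2 : f.toList.take i = "WORKING".toList
    · have hi := hlenEq _ h2
      rw [hB, hheadEq _ h2]
      simp only [show pvSuggestions.get? "WORKING" = some " (or add descriptive suffix like _v2, _draft)" from rfl]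
      simp only [suggest_better_name_py, pvA_loop,
        hswT "WORKING_" "WORKING".toList (by decide) (by decide) h2,
        hswF "ENHANCED_" "ENHANCED".toList (by decide) (by decide) h1]
      simp [hi]
    by_cases h3 : f.toList.take i = "FIXED".toList
    · have hi := hlenEq _ h3
      rw [hB, hheadEq _ h3]
      simp only [show pvSuggestions.get? "FIXED" = some " (remove temporary prefix)" from rfl]
      simp only [suggest_better_name_py, pvA_loop,
        hswT "FIXED_" "FIXED".toList (by decide) (by decide) h3,
        hswF "ENHANCED_" "ENHANCED".toList (by decide) (by decide) h1,
        hswF "WORKING_" "WORKING".toList (by decide) (by decide) h2]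
      simp [hi]
    by_cases h4 : f.toList.take i = "FINAL".toList
    · have hi := hlenEq _ h4
      rw [hB, hheadEq _ h4]
      simp only [show pvSuggestions.get? "FINAL" = some " (remove temporary prefix)" from rfl]
      simp only [suggest_better_name_py, pvA_loop,
        hswT "FINAL_" "FINAL".toList (by decide) (by decide) h4,
        hswF "ENHANCED_" "ENHANCED".toList (by decide) (by decide) h1,
        hswF "WORKING_" "WORKING".toList (by decide) (by decide) h2,
        hswF "FIXED_" "FIXED".toList (by decide) (by decide) h3]
      simp [hi]
    by_cases h5 : f.toList.take i = "NEW".toList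
    · have hi := hlenEq _ h5
      rw [hB, hheadEq _ h5]
      simp only [show pvSuggestions.get? "NEW" = some " (use version control instead)" from rfl]
      simp only [suggest_better_name_py, pvA_loop,
        hswT "NEW_" "NEW".toList (by decide) (by decide) h5,
        hswF "ENHANCED_" "ENHANCED".toList (by decide) (by decide) h1,
        hswF "WORKING_" "WORKING".toList (by decide) (by decide) h2,
        hswF "FIXED_" "FIXED".toList (by decide) (by decide) h3,
        hswF "FINAL_" "FINAL".toList (by decide) (by decide) h4]
      simp [hi]
    by_cases h6 : f.toList.take i = "OLD".toList
    · have hi := hlenEq _ h6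
      rw [hB, hheadEq _ h6]
      simp only [show pvSuggestions.get? "OLD" = some " (use version control instead)" from rfl]
      simp only [suggest_better_name_py, pvA_loop,
        hswT "OLD_" "OLD".toList (by decide) (by decide) h6,
        hswF "ENHANCED_" "ENHANCED".toList (by decide) (by decide) h1,
        hswF "WORKING_" "WORKING".toList (by decide) (by decide) h2,
        hswF "FIXED_" "FIXED".toList (by decide) (by decide) h3,
        hswF "FINAL_" "FINAL".toList (by decide) (by decide) h4,
        hswF "NEW_" "NEW".toList (by decide) (by decide) h5]
      simp [hi]
    by_cases h7 : f.toList.take i = "TEMP".toList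
    · have hi := hlenEq _ h7
      rw [hB, hheadEq _ h7]
      simp only [show pvSuggestions.get? "TEMP" = some " (move to temp/ or tests/ directory)" from rfl]
      simp only [suggest_better_name_py, pvA_loop,
        hswT "TEMP_" "TEMP".toList (by decide) (by decide) h7,
        hswF "ENHANCED_" "ENHANCED".toList (by decide) (by decide) h1,
        hswF "WORKING_" "WORKING".toList (by decide) (by decide) h2,
        hswF "FIXED_" "FIXED".toList (by decide) (by decide) h3,
        hswF "FINAL_" "FINAL".toList (by decide) (by decide) h4,
        hswF "NEW_" "NEW".toList (by decide) (by decide) h5,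
        hswF "OLD_" "OLD".toList (by decide) (by decide) h6]
      simp [hi]
    by_cases h8 : f.toList.take i = "TEST".toList
    · have hi := hlenEq _ h8
      rw [hB, hheadEq _ h8]
      simp only [show pvSuggestions.get? "TEST" = some " (move to temp/ or tests/ directory)" from rfl]
      simp only [suggest_better_name_py, pvA_loop,
        hswT "TEST_" "TEST".toList (by decide) (by decide) h8,
        hswF "ENHANCED_" "ENHANCED".toList (by decide) (by decide) h1,
        hswF "WORKING_" "WORKING".toList (by decide) (by decide) h2,
        hswF "FIXED_" "FIXED".toList (by decide) (by decide) h3,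
        hswF "FINAL_" "FINAL".toList (by decide) (by decide) h4,
        hswF "NEW_" "NEW".toList (by decide) (by decide) h5,
        hswF "OLD_" "OLD".toList (by decide) (by decide) h6,
        hswF "TEMP_" "TEMP".toList (by decide) (by decide) h7]
      simp [hi]
    · -- no token matched
      rw [hB, pv_get_none _ (hneS _ h1) (hneS _ h2) (hneS _ h3) (hneS _ h4) (hneS _ h5) (hneS _ h6) (hneS _ h7) (hneS _ h8)]
      simp only [suggest_better_name_py, pvA_loop,
        hswF "ENHANCED_" "ENHANCED".toList (by decide) (by decide) h1,
        hswF "WORKING_" "WORKING".toList (by decide) (by decide) h2,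
        hswF "FIXED_" "FIXED".toList (by decide) (by decide) h3,
        hswF "FINAL_" "FINAL".toList (by decide) (by decide) h4,
        hswF "NEW_" "NEW".toList (by decide) (by decide) h5,
        hswF "OLD_" "OLD".toList (by decide) (by decide) h6,
        hswF "TEMP_" "TEMP".toList (by decide) (by decide) h7,
        hswF "TEST_" "TEST".toList (by decide) (by decide) h8]
      simp

-- ===== VERDICT (by name: the statement is the Claim_ definition above) =====
theorem suggest_better_name_py_spec : Claim_equal_suggest_better_name_py := by
  intro filename _
  unfold Spec_suggest_better_name_py
  exact pv_main filename
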